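-- pv_equiv track=rewrite | github.com/kustex/CFTC-COT-Report | cftc_analyser.py | get_second_latest_i
-- ===== SOURCE A (Python) =====
-- def get_second_latest_i(list_of_i_and_date, latest_i):
--     previous_i = 0
--     second_latest_i = 0
--     for i, date in list_of_i_and_date:
--         if i == latest_i:
--             second_latest_i = previous_i
--         else:
--             previous_i = i
--     return second_latest_i
-- ===== SOURCE B (Python) =====
-- def get_second_latest_i(list_of_i_and_date, latest_i):
--     rev = [i for i, _ in list_of_i_and_date]
--     rev.reverse()
--     try:
--         k = rev.index(latest_i)
--     except ValueError:
--         return 0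
--     for v in rev[k + 1:]:
--         if v != latest_i:
--             return v
--     return 0
-- ===== Notes on version B (the rewrite author's own statement) =====
-- stated objective: alternative
-- what changed: Replaces the single forward pass with two running accumulators by a reversed-list search: locate the first (i.e. last) occurrence of latest_i in the reversed i-values, then scan past it for the first value different from latest_i, with early exit.
import Mathlib
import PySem

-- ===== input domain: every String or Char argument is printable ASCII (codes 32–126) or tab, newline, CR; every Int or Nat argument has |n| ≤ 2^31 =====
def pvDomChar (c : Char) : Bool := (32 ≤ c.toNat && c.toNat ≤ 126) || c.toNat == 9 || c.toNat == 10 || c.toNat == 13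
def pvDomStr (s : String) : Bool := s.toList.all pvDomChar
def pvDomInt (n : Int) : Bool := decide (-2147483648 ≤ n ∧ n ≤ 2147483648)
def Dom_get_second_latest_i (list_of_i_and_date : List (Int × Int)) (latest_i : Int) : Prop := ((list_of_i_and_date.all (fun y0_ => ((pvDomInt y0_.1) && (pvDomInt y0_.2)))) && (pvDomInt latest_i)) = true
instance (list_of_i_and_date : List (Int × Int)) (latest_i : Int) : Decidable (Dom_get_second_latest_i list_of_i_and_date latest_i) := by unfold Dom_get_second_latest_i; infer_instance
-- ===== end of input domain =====

-- B reverses the list of i-values and searches from the last match instead of A's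
-- single forward pass with two running accumulators; same cost, different traversal.

-- ===== PORT A =====
-- literal port of A: one fold over the pairs carrying (previous_i, second_latest_i)
def get_second_latest_i (list_of_i_and_date : List (Int × Int)) (latest_i : Int) : Int :=
  (list_of_i_and_date.foldl
    (fun (st : Int × Int) e =>
      if e.1 = latest_i then (st.1, st.1) else (e.1, st.2))
    (0, 0)).2

-- ===== PORT B =====
-- B's `for v in rev[k+1:]: if v != latest_i: return v` / `return 0` loop
def pvFirstNonMatch (t : Int) : List Int → Int
  | [] => 0
  | v :: rest => if v ≠ t then v else pvFirstNonMatch t rest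

def get_second_latest_i_alt (list_of_i_and_date : List (Int × Int)) (latest_i : Int) : Int :=
  let rev := (list_of_i_and_date.map (fun p => p.1)).reverse
  match PySem.List.index? rev latest_i with
  | none => 0
  | some k => pvFirstNonMatch latest_i (PySem.List.slice rev (some ((k : Int) + 1)) none)

-- ===== PRECONDITION & SPEC =====
def Spec_get_second_latest_i (list_of_i_and_date : List (Int × Int)) (latest_i : Int) (out : Int) : Prop := out = get_second_latest_i_alt list_of_i_and_date latest_i
instance (list_of_i_and_date : List (Int × Int)) (latest_i : Int) (out : Int) : Decidable (Spec_get_second_latest_i list_of_i_and_date latest_i out) := by unfold Spec_get_second_latest_i; infer_instance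

-- ===== CLAIM (what is proved, stated in full; the proofs are below) =====
def Claim_equal_get_second_latest_i : Prop := ∀ (list_of_i_and_date : List (Int × Int)) (latest_i : Int), Dom_get_second_latest_i list_of_i_and_date latest_i → Spec_get_second_latest_i list_of_i_and_date latest_i (get_second_latest_i list_of_i_and_date latest_i)

-- ===== LEMMAS AND PROOFS =====

-- common characterisation: result as a head recursion on the reversed i-values
def pvSpec (t : Int) : List Int → Int
  | [] => 0
  | x :: r => if x = t then pvFirstNonMatch t r else pvSpec t r

theorem fold_fst (t : Int) (l : List (Int × Int)) :
    (l.foldl (fun (st : Int × Int) e =>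
      if e.1 = t then (st.1, st.1) else (e.1, st.2)) (0, 0)).1
    = pvFirstNonMatch t ((l.map (fun p => p.1)).reverse) := by
  induction l using List.reverseRecOn with
  | nil => simp [pvFirstNonMatch]
  | append_singleton l e ih =>
    simp only [List.foldl_append, List.foldl_cons, List.foldl_nil,
      List.map_append, List.reverse_append, List.map_cons, List.map_nil,
      List.reverse_cons, List.reverse_nil, List.nil_append, List.cons_append,
      pvFirstNonMatch]
    by_cases h : e.1 = t <;> simp [h, ih]

theorem fold_snd (t : Int) (l : List (Int × Int)) :
    (l.foldl (fun (st : Int × Int) e =>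
      if e.1 = t then (st.1, st.1) else (e.1, st.2)) (0, 0)).2
    = pvSpec t ((l.map (fun p => p.1)).reverse) := by
  induction l using List.reverseRecOn with
  | nil => simp [pvSpec]
  | append_singleton l e ih =>
    simp only [List.foldl_append, List.foldl_cons, List.foldl_nil,
      List.map_append, List.reverse_append, List.map_cons, List.map_nil,
      List.reverse_cons, List.reverse_nil, List.nil_append, List.cons_append,
      pvSpec]
    by_cases h : e.1 = t <;> simp [h, ih, fold_fst]

theorem alt_core (t : Int) (r : List Int) :
    (match PySem.List.index? r t with
     | none => 0
     | some k => pvFirstNonMatch t (PySem.List.slice r (some ((k : Int) + 1)) none))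
    = pvSpec t r := by
  induction r with
  | nil => simp [PySem.List.index?, pvSpec]
  | cons x rest ih =>
    by_cases h : x = t
    · subst h
      rw [PySem.List.index?_cons_self]
      have : ((0 : Nat) : Int) + 1 = ((1 : Nat) : Int) := by norm_num
      simp only [this, PySem.List.slice_from_natCast]
      simp [pvSpec]
    · rw [PySem.List.index?_cons_of_ne rest h]
      cases hk : PySem.List.index? rest t with
      | none => simp only [hk, Option.map_none] at ih ⊢; simp [pvSpec, h, ← ih]
      | some k =>
        simp only [hk, Option.map_some] at ih ⊢
        have e1 : ((k + 1 : Nat) : Int) + 1 = ((k + 2 : Nat) : Int) := by push_cast; ring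
        have e2 : ((k : Nat) : Int) + 1 = ((k + 1 : Nat) : Int) := by push_cast; ring
        rw [e1, PySem.List.slice_from_natCast] at *
        rw [e2, PySem.List.slice_from_natCast] at ih
        simp only [pvSpec, h, ← ih]
        rfl

-- ===== VERDICT (by name: the statement is the Claim_ definition above) =====
theorem get_second_latest_i_spec : Claim_equal_get_second_latest_i := by
  intro l t _
  unfold Spec_get_second_latest_i get_second_latest_i get_second_latest_i_alt
  rw [fold_snd, ← alt_core]
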